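-- pv_equiv track=rewrite | github.com/kaebmoo/univer | fv_report_generator/src/row_builder.py | _strip_numeric_prefix
-- ===== SOURCE A (Python) =====
-- def _strip_numeric_prefix(text: str) -> str:
--     """Drop a leading 'NN.' or 'N.' prefix from a label (keep the rest as-is)."""
--     s = (text or "").strip()
--     i = 0
--     while i < len(s) and s[i].isdigit():
--         i += 1
--     if i > 0 and i < len(s) and s[i] == ".":
--         return s[i + 1:].lstrip()
--     return s
-- ===== SOURCE B (Python) =====
-- def _strip_numeric_prefix(text: str) -> str:
--     """Drop a leading 'NN.' or 'N.' prefix from a label (keep the rest as-is)."""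
--     s = (text or "").strip()
--     j = s.find('.')
--     if j > 0 and s[:j].isdigit():
--         return s[j + 1:].lstrip()
--     return s
-- ===== Notes on version B (the rewrite author's own statement) =====
-- stated objective: simpler
-- what changed: Replaces A's index-based while loop that counts leading digit characters one by one with a single str.find to locate the first dot plus a whole-head str.isdigit test on the slice before it.
import Mathlib
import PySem

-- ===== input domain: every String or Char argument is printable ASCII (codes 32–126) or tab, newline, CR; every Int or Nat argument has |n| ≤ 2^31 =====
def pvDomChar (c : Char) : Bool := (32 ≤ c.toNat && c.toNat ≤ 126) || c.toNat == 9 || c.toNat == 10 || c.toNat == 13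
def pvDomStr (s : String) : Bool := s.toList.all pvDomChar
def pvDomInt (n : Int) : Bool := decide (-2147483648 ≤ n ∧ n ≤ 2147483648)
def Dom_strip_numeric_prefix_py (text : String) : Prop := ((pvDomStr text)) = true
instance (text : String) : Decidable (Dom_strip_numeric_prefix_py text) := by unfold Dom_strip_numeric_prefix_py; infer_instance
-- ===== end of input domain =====

-- B replaces A's char-by-char digit-counting loop with str.find of the first dot plus a whole-head isdigit test (objective: simpler).

-- ===== PORT A =====
-- A's while loop: advance i while i < len(s) and s[i].isdigit()
def pvScanDigits (s : List Char) (i : Nat) : Nat :=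
  if h : i < s.length then
    if PySem.Chars.isdigit s[i] then pvScanDigits s (i + 1) else i
  else i
termination_by s.length - i

def strip_numeric_prefix_py (text : String) : String :=
  let s := PySem.Chars.strip text.toList
  let i := pvScanDigits s 0
  if 0 < i ∧ PySem.List.pyGet? s (i : Int) = some '.' then
    String.ofList (PySem.Chars.lstrip (PySem.List.slice s (some ((i : Int) + 1)) none))
  else String.ofList s

-- ===== PORT B =====
def strip_numeric_prefix_py_alt (text : String) : String :=
  let s := PySem.Chars.strip text.toList
  let j := PySem.Chars.find s ['.']
  if 0 < j ∧ PySem.Chars.strIsdigit (PySem.List.slice s none (some j)) = true then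
    String.ofList (PySem.Chars.lstrip (PySem.List.slice s (some (j + 1)) none))
  else String.ofList s

-- ===== PRECONDITION & SPEC =====
def Spec_strip_numeric_prefix_py (text : String) (out : String) : Prop := out = strip_numeric_prefix_py_alt text
instance (text : String) (out : String) : Decidable (Spec_strip_numeric_prefix_py text out) := by unfold Spec_strip_numeric_prefix_py; infer_instance

-- ===== CLAIM (what is proved, stated in full; the proofs are below) =====
def Claim_equal_strip_numeric_prefix_py : Prop := ∀ (text : String), Dom_strip_numeric_prefix_py text → Spec_strip_numeric_prefix_py text (strip_numeric_prefix_py text)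

-- ===== LEMMAS AND PROOFS =====

-- the singleton-prefix shape find works with
lemma singleton_prefix_iff (c : Char) (l : List Char) : [c] <+: l ↔ l[0]? = some c := by
  cases l with
  | nil => simp
  | cons a t => simp [List.cons_prefix_cons, eq_comm]

-- A's scan lands on the length of the leading run of digits
lemma pvScanDigits_spec (s : List Char) (i : Nat) :
    pvScanDigits s i = i + ((s.drop i).takeWhile PySem.Chars.isdigit).length := by
  rw [pvScanDigits]
  split
  · rename_i h
    split
    · rename_i hd
      rw [pvScanDigits_spec s (i + 1), List.drop_eq_getElem_cons h, List.takeWhile_cons, if_pos hd]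
      simp [Nat.add_comm, Nat.add_assoc]
    · rename_i hd
      rw [List.drop_eq_getElem_cons h, List.takeWhile_cons, if_neg hd]
      simp
  · rename_i h
    rw [List.drop_eq_nil_of_le (by omega)]
    simp
termination_by s.length - i

lemma tw_getElem? {p : Char → Bool} {l : List Char} {k : Nat}
    (hk : k < (l.takeWhile p).length) : ∃ c, l[k]? = some c ∧ p c = true := by
  induction l generalizing k with
  | nil => simp at hk
  | cons a t ih =>
    rw [List.takeWhile_cons] at hk
    by_cases hpa : p a = true
    · rw [if_pos hpa] at hk
      cases k with
      | zero => exact ⟨a, by simp, hpa⟩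
      | succ k =>
        obtain ⟨c, hc, hpc⟩ := ih (k := k) (by simpa using hk)
        exact ⟨c, by simpa using hc, hpc⟩
    · rw [if_neg hpa] at hk
      simp at hk

lemma tw_stop {p : Char → Bool} {l : List Char} {c : Char}
    (h : l[(l.takeWhile p).length]? = some c) : p c = false := by
  induction l with
  | nil => simp at h
  | cons a t ih =>
    rw [List.takeWhile_cons] at h
    by_cases hpa : p a = true
    · rw [if_pos hpa] at h
      exact ih (by simpa using h)
    · rw [if_neg hpa] at h
      simp at h
      rw [← h]
      simpa using hpa

lemma tw_unique {p : Char → Bool} {l : List Char} {j : Nat}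
    (hall : ∀ k, k < j → ∀ c, l[k]? = some c → p c = true)
    (c : Char) (hj : l[j]? = some c) (hc : p c = false) :
    (l.takeWhile p).length = j := by
  rcases Nat.lt_trichotomy (l.takeWhile p).length j with h | h | h
  · exfalso
    have hjl : j < l.length := by
      have : l[j]?.isSome := by rw [hj]; rfl
      simpa using this
    have hn : (l.takeWhile p).length < l.length := by omega
    have hsome : l[(l.takeWhile p).length]? = some l[(l.takeWhile p).length] :=
      List.getElem?_eq_getElem hn
    have hstop := tw_stop hsome
    have := hall _ h _ hsome
    rw [this] at hstop
    simp at hstop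
  · exact h
  · exfalso
    obtain ⟨c', hc', hpc'⟩ := tw_getElem? h
    rw [hj] at hc'
    cases hc'
    rw [hc] at hpc'
    exact Bool.false_ne_true hpc'

-- the two if-bodies agree: core equality on the stripped character list
lemma core_eq (s : List Char) :
    (if 0 < pvScanDigits s 0 ∧ PySem.List.pyGet? s ((pvScanDigits s 0 : Nat) : Int) = some '.' then
       String.ofList (PySem.Chars.lstrip (PySem.List.slice s (some (((pvScanDigits s 0 : Nat) : Int) + 1)) none))
     else String.ofList s) =
    (if 0 < PySem.Chars.find s ['.'] ∧ PySem.Chars.strIsdigit (PySem.List.slice s none (some (PySem.Chars.find s ['.']))) = true then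
       String.ofList (PySem.Chars.lstrip (PySem.List.slice s (some (PySem.Chars.find s ['.'] + 1)) none))
     else String.ofList s) := by
  have hn0 : pvScanDigits s 0 = (s.takeWhile PySem.Chars.isdigit).length := by
    rw [pvScanDigits_spec]; simp
  set n := pvScanDigits s 0 with hn
  by_cases hA : 0 < n ∧ PySem.List.pyGet? s ((n : Nat) : Int) = some '.'
  · obtain ⟨hpos, hdot⟩ := hA
    have hdot' : s[n]? = some '.' := by
      rw [PySem.List.pyGet?_natCast] at hdot; exact hdot
    have hinfix : ['.'] <+: s.drop n := by
      rw [singleton_prefix_iff]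
      simpa [List.getElem?_drop] using hdot'
    have hnn : 0 ≤ PySem.Chars.find s ['.'] :=
      (PySem.Chars.find_nonneg_iff s ['.']).mpr
        (List.IsInfix.trans hinfix.isInfix (List.drop_suffix n s).isInfix)
    obtain ⟨hpref, hmin⟩ := PySem.Chars.find_spec hnn
    have hms : (PySem.Chars.find s ['.']).toNat = n := by
      rcases Nat.lt_trichotomy (PySem.Chars.find s ['.']).toNat n with h | h | h
      · exfalso
        rw [hn0] at h
        obtain ⟨c, hc, hpc⟩ := tw_getElem? h
        rw [singleton_prefix_iff] at hpref
        rw [List.getElem?_drop, Nat.add_zero] at hpref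
        rw [hpref] at hc
        cases hc
        exact absurd hpc (by decide)
      · exact h
      · exact absurd hinfix (hmin n h)
    have hfind : PySem.Chars.find s ['.'] = (n : Int) := by
      have := Int.toNat_of_nonneg hnn
      rw [hms] at this
      exact this.symm
    have hlen : n < s.length := by
      have : s[n]?.isSome := by rw [hdot']; rfl
      simpa using this
    have htake : s.take n = s.takeWhile PySem.Chars.isdigit := by
      rw [hn0]
      exact (List.prefix_iff_eq_take.mp (List.takeWhile_prefix _)).symm
    have hB : PySem.Chars.strIsdigit (PySem.List.slice s none (some (PySem.Chars.find s ['.']))) = true := by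
      rw [hfind, PySem.List.slice_to s (by positivity), Int.toNat_natCast, htake]
      have hne : (s.takeWhile PySem.Chars.isdigit) ≠ [] := by
        intro h
        rw [hn0, h] at hpos
        simp at hpos
      simp [PySem.Chars.strIsdigit, hne]
    rw [if_pos ⟨hpos, hdot⟩, if_pos ⟨by rw [hfind]; exact_mod_cast hpos, hB⟩, hfind]
  · rw [if_neg hA, if_neg ?hB]
    case hB =>
      rintro ⟨hjpos, hdig⟩
      have hnn : 0 ≤ PySem.Chars.find s ['.'] := le_of_lt hjpos
      obtain ⟨hpref, hmin⟩ := PySem.Chars.find_spec hnn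
      set m := (PySem.Chars.find s ['.']).toNat with hm
      have hdotm : s[m]? = some '.' := by
        rw [singleton_prefix_iff] at hpref
        rw [List.getElem?_drop, Nat.add_zero] at hpref
        exact hpref
      rw [PySem.List.slice_to s hnn, ← hm] at hdig
      have hne : s.take m ≠ [] := by
        intro h
        rw [h] at hdig
        simp [PySem.Chars.strIsdigit] at hdig
      have hall : ∀ k, k < m → ∀ c, s[k]? = some c → PySem.Chars.isdigit c = true := by
        intro k hk c hc
        have hmem : c ∈ s.take m := by
          have htk : (s.take m)[k]? = some c := by
            rw [List.getElem?_take]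
            simp [hk, hc]
          exact List.mem_of_getElem? htk
        simp [PySem.Chars.strIsdigit] at hdig
        exact hdig.2 c hmem
      have huni := tw_unique hall '.' hdotm (by decide)
      rw [← hn0] at huni
      apply hA
      constructor
      · omega
      · rw [PySem.List.pyGet?_natCast, huni]
        exact hdotm

-- ===== VERDICT (by name: the statement is the Claim_ definition above) =====
theorem strip_numeric_prefix_py_spec : Claim_equal_strip_numeric_prefix_py := by
  intro text _
  unfold Spec_strip_numeric_prefix_py strip_numeric_prefix_py strip_numeric_prefix_py_alt
  exact core_eq (PySem.Chars.strip text.toList)
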